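-- pv_equiv track=rewrite | github.com/dkrasilnikovs87/vcf-to-html | vcf_parser.py | _join_qp_continuations
-- ===== SOURCE A (Python) =====
-- def _join_qp_continuations(lines: list[str]) -> list[str]:
--     """
--     Handle vCard 2.1 Quoted-Printable line folding.
--     QP-encoded lines end with '=' as a soft break; the value continues
--     on the very next line without any leading whitespace (unlike RFC folding).
--     """
--     result = []
--     i = 0
--     while i < len(lines):
--         line = lines[i]
--         if ':' in line:
--             prop_part = line.split(':', 1)[0].upper()
--             if 'QUOTED-PRINTABLE' in prop_part:
--                 while line.endswith('=') and (i + 1) < len(lines):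
--                     i += 1
--                     line = line[:-1] + lines[i]
--         result.append(line)
--         i += 1
--     return result
-- ===== SOURCE B (Python) =====
-- def _join_qp_continuations(lines: list[str]) -> list[str]:
--     result = []
--     pending = None
--     for line in lines:
--         if pending is not None:
--             pending = pending[:-1] + line
--             if not pending.endswith('='):
--                 result.append(pending)
--                 pending = None
--         elif (':' in line
--               and 'QUOTED-PRINTABLE' in line.split(':', 1)[0].upper()
--               and line.endswith('=')):
--             pending = line
--         else:
--             result.append(line)
--     if pending is not None:
--         result.append(pending)
--     return result
-- ===== Notes on version B (the rewrite author's own statement) =====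
-- stated objective: simpler
-- what changed: Replaced the index-based while loop with a nested merging while by a single flat pass over the lines carrying a 'pending' accumulator that is flushed when the soft break ends (or at end of input), removing all index arithmetic and repeated bound checks.
import Mathlib
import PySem

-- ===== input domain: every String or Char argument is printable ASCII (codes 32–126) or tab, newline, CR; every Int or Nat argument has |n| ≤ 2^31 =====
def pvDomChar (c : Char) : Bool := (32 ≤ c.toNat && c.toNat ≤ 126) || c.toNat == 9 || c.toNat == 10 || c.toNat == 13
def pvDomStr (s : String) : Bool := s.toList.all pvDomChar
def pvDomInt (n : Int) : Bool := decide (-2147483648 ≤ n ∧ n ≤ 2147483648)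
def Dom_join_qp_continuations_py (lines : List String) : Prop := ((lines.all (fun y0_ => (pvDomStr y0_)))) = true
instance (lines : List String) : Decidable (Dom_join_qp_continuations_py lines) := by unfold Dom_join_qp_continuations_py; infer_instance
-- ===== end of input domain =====

-- B replaces A's index-based outer/inner while loops by one flat pass with a
-- 'pending' soft-break accumulator (objective: simpler; no speed claim).

-- ===== PORT A =====
-- shared small expressions of the Python source (both versions compute them verbatim)
-- line[:-1] + nxt
def pvMerge (line nxt : String) : String := PySem.Str.slice line none (some (-1)) ++ nxt
-- line.endswith('=')
def pvEnds (line : String) : Bool := PySem.Str.endswith line "="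
-- line.split(':', 1)[0].upper()
def pvPropPart (line : String) : String :=
  PySem.Str.upper (((PySem.Str.splitMax? line ":" 1).getD []).headD "")

-- inner 'while line.endswith('=') and (i + 1) < len(lines)' of A
def qpInnerA (lines : List String) (line : String) (i : Nat) : String × Nat :=
  if h : pvEnds line = true ∧ i + 1 < lines.length then
    qpInnerA lines (pvMerge line (lines[i+1]'h.2)) (i+1)
  else (line, i)
termination_by lines.length - i
decreasing_by omega

theorem qpInnerA_ge (lines : List String) (line : String) (i : Nat) :
    i ≤ (qpInnerA lines line i).2 := by
  fun_induction qpInnerA with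
  | case1 line i h ih => omega
  | case2 => simp

-- outer 'while i < len(lines)' of A
def qpOuterA (lines : List String) (result : List String) (i : Nat) : List String :=
  if h : i < lines.length then
    if PySem.Str.isIn ":" (lines[i]'h) = true ∧
       PySem.Str.isIn "QUOTED-PRINTABLE" (pvPropPart (lines[i]'h)) = true then
      qpOuterA lines (result ++ [(qpInnerA lines (lines[i]'h) i).1])
        ((qpInnerA lines (lines[i]'h) i).2 + 1)
    else
      qpOuterA lines (result ++ [lines[i]'h]) (i + 1)
  else result
termination_by lines.length - i
decreasing_by
  · have h1 := qpInnerA_ge lines (lines[i]'h) i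
    omega
  · omega

def join_qp_continuations_py (lines : List String) : List String := qpOuterA lines [] 0

-- ===== PORT B =====
-- ':' in line and 'QUOTED-PRINTABLE' in line.split(':',1)[0].upper()
def pvIsQPB (line : String) : Bool :=
  PySem.Str.isIn ":" line && PySem.Str.isIn "QUOTED-PRINTABLE" (pvPropPart line)

-- B's single 'for line in lines' pass with the pending accumulator
def qpLoopB (result : List String) (pending : Option String) (rest : List String) : List String :=
  match rest with
  | [] =>
    match pending with
    | none => result
    | some p => result ++ [p]
  | line :: rest' =>
    match pending with
    | some p =>
      let p' := pvMerge p line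
      if pvEnds p' = true then qpLoopB result (some p') rest'
      else qpLoopB (result ++ [p']) none rest'
    | none =>
      if (pvIsQPB line && pvEnds line) = true then qpLoopB result (some line) rest'
      else qpLoopB (result ++ [line]) none rest'

def join_qp_continuations_py_alt (lines : List String) : List String := qpLoopB [] none lines

-- ===== PRECONDITION & SPEC =====
def Spec_join_qp_continuations_py (lines : List String) (out : List String) : Prop := out = join_qp_continuations_py_alt lines
instance (lines : List String) (out : List String) : Decidable (Spec_join_qp_continuations_py lines out) := by unfold Spec_join_qp_continuations_py; infer_instance

-- ===== CLAIM (what is proved, stated in full; the proofs are below) =====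
def Claim_equal_join_qp_continuations_py : Prop := ∀ (lines : List String), Dom_join_qp_continuations_py lines → Spec_join_qp_continuations_py lines (join_qp_continuations_py lines)

-- ===== LEMMAS AND PROOFS =====

-- list-suffix reformulation of A's loops, used only in the proofs
def aInner (line : String) (rest : List String) : String × List String :=
  match rest with
  | [] => (line, [])
  | r :: rs => if pvEnds line = true then aInner (pvMerge line r) rs else (line, r :: rs)

theorem aInner_len (line : String) (rest : List String) :
    (aInner line rest).2.length ≤ rest.length := by
  fun_induction aInner with
  | case1 => simp
  | case2 line r rs h ih => simpa [aInner] using Nat.le_succ_of_le ih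
  | case3 => simp

theorem aInner_not_ends (line : String) (rest : List String) (h : ¬ pvEnds line = true) :
    aInner line rest = (line, rest) := by
  cases rest with
  | nil => rfl
  | cons r rs => simp [aInner, h]

def aList (result : List String) (rest : List String) : List String :=
  match rest with
  | [] => result
  | line :: rs =>
    if PySem.Str.isIn ":" line = true ∧
       PySem.Str.isIn "QUOTED-PRINTABLE" (pvPropPart line) = true then
      aList (result ++ [(aInner line rs).1]) (aInner line rs).2
    else
      aList (result ++ [line]) rs
termination_by rest.length
decreasing_by
  · have := aInner_len line rs; simp; omega
  · simp

-- A's inner loop at index i computes aInner on the suffix lines.drop (i+1)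
theorem qpInnerA_eq_aInner (lines : List String) (line : String) (i : Nat) :
    (qpInnerA lines line i).1 = (aInner line (lines.drop (i+1))).1 ∧
    lines.drop ((qpInnerA lines line i).2 + 1) = (aInner line (lines.drop (i+1))).2 := by
  fun_induction qpInnerA with
  | case1 line i h ih =>
    have hd : lines.drop (i+1) = lines[i+1] :: lines.drop (i+2) :=
      List.drop_eq_getElem_cons h.2
    rw [hd]
    simpa [aInner, h.1] using ih
  | case2 line i h =>
    rcases Decidable.not_and_iff_not_or_not.mp h with h1 | h2
    · rw [aInner_not_ends line _ h1]; exact ⟨rfl, rfl⟩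
    · have hnil : lines.drop (i+1) = [] := List.drop_eq_nil_of_le (by omega)
      rw [hnil]; exact ⟨rfl, rfl⟩

-- A's outer loop at index i computes aList on the suffix lines.drop i
theorem qpOuterA_eq_aList (lines : List String) (result : List String) (i : Nat) :
    qpOuterA lines result i = aList result (lines.drop i) := by
  fun_induction qpOuterA with
  | case1 result i h hq ih =>
    have hd : lines.drop i = lines[i] :: lines.drop (i+1) := List.drop_eq_getElem_cons h
    obtain ⟨h1, h2⟩ := qpInnerA_eq_aInner lines (lines[i]'h) i
    rw [hd, aList, if_pos hq, ← h1, ← h2]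
    exact ih
  | case2 result i h hq ih =>
    have hd : lines.drop i = lines[i] :: lines.drop (i+1) := List.drop_eq_getElem_cons h
    rw [hd, aList, if_neg hq]
    exact ih
  | case3 result i h =>
    have hnil : lines.drop i = [] := List.drop_eq_nil_of_le (by omega)
    rw [hnil, aList]

-- B with a pending '='-ending buffer finishes exactly A's inner merge
theorem qpLoopB_pending (rest : List String) :
    ∀ (p : String) (result : List String), pvEnds p = true →
    qpLoopB result (some p) rest =
      qpLoopB (result ++ [(aInner p rest).1]) none (aInner p rest).2 := by
  induction rest with
  | nil => intro p result hp; simp [qpLoopB, aInner]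
  | cons r rs ih =>
    intro p result hp
    by_cases he : pvEnds (pvMerge p r) = true
    · simp only [qpLoopB, he, if_true]
      rw [aInner, if_pos hp]
      exact ih (pvMerge p r) result he
    · simp only [qpLoopB, he]
      rw [aInner, if_pos hp, aInner_not_ends _ _ he]
      simp

-- the main bridge: aList = B's flat loop
theorem aList_eq_qpLoopB (n : Nat) (rest : List String) (result : List String)
    (hn : rest.length ≤ n) : aList result rest = qpLoopB result none rest := by
  induction n generalizing rest result with
  | zero =>
    have hnil : rest = [] := List.eq_nil_of_length_eq_zero (by omega)
    subst hnil; simp [aList, qpLoopB]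
  | succ n ih =>
    cases rest with
    | nil => simp [aList, qpLoopB]
    | cons line rs =>
      simp only [List.length_cons] at hn
      by_cases hq : PySem.Str.isIn ":" line = true ∧
          PySem.Str.isIn "QUOTED-PRINTABLE" (pvPropPart line) = true
      · by_cases he : pvEnds line = true
        · have hb : (pvIsQPB line && pvEnds line) = true := by
            simp only [pvIsQPB, hq.1, hq.2, he, Bool.and_self]
          rw [aList, if_pos hq,
              ih _ _ (le_trans (aInner_len line rs) (by omega)),
              ← qpLoopB_pending rs line result he]
          simp only [qpLoopB, hb, if_true]
        · have he' : pvEnds line = false := Bool.eq_false_iff.mpr he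
          have hb : (pvIsQPB line && pvEnds line) = false := by
            simp only [he', Bool.and_false]
          rw [aList, if_pos hq, aInner_not_ends _ _ he]
          simp only [qpLoopB, hb]
          exact ih rs _ (by omega)
      · have hb : (pvIsQPB line && pvEnds line) = false := by
          rcases Decidable.not_and_iff_not_or_not.mp hq with h1 | h2
          · have h1' : PySem.Str.isIn ":" line = false := Bool.eq_false_iff.mpr h1
            simp only [pvIsQPB, h1', Bool.false_and]
          · have h2' : PySem.Str.isIn "QUOTED-PRINTABLE" (pvPropPart line) = false :=
              Bool.eq_false_iff.mpr h2
            simp only [pvIsQPB, h2', Bool.and_false, Bool.false_and]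
        rw [aList, if_neg hq]
        simp only [qpLoopB, hb]
        exact ih rs _ (by omega)

-- ===== VERDICT (by name: the statement is the Claim_ definition above) =====
theorem join_qp_continuations_py_spec : Claim_equal_join_qp_continuations_py := by
  intro lines _
  unfold Spec_join_qp_continuations_py join_qp_continuations_py join_qp_continuations_py_alt
  rw [qpOuterA_eq_aList lines [] 0, List.drop_zero]
  exact aList_eq_qpLoopB lines.length lines [] (le_refl _)
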